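-- pv_equiv track=rewrite | github.com/chrehall68/advent-of-code-2023 | day14/solution.py | tilt_right
-- ===== SOURCE A (Python) =====
-- from typing import List, Tuple
--
-- def tilt_right(lines: str) -> List[List[str]]:
--     lines = lines.split("\n")
--     tilted = list(map(lambda s: list(map(lambda c: c, s)), lines))
--
--     for row in range(len(tilted)):
--         rightmost = len(tilted[0]) - 1
--         for col in range(len(tilted[0]) - 1, -1, -1):
--             if lines[row][col] == "#":
--                 rightmost = col - 1
--             if lines[row][col] == "O":
--                 tilted[row][col] = "."
--                 tilted[row][rightmost] = "O"
--                 rightmost -= 1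
--
--     return tilted
-- ===== SOURCE B (Python) =====
-- from typing import List
--
--
-- def tilt_right(lines: str) -> List[List[str]]:
--     out = []
--     for row in lines.split("\n"):
--         segs = []
--         for seg in row.split("#"):
--             k = seg.count("O")
--             segs.append("".join("." if c == "O" else c for c in seg[: len(seg) - k]) + "O" * k)
--         out.append(list("#".join(segs)))
--     return out
-- ===== Notes on version B (the rewrite author's own statement) =====
-- stated objective: simpler
-- what changed: Replaces A's in-place rightmost-pointer scan over a mutable grid of cells by splitting each row at the fixed rocks, rebuilding every segment as its left part with rolling rocks blanked followed by count-many rolling rocks, and rejoining; the per-cell Python loop becomes C-level str split/count/join, which is the constant-factor speed mechanism.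
-- outside the precondition, e.g. on tilt_right('O\nO.'): A returns [['O'], ['O', '.']], B returns [['O'], ['.', 'O']]; on tilt_right('ab\nc'): A raises IndexError, B returns [['a', 'b'], ['c']]
import Mathlib
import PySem

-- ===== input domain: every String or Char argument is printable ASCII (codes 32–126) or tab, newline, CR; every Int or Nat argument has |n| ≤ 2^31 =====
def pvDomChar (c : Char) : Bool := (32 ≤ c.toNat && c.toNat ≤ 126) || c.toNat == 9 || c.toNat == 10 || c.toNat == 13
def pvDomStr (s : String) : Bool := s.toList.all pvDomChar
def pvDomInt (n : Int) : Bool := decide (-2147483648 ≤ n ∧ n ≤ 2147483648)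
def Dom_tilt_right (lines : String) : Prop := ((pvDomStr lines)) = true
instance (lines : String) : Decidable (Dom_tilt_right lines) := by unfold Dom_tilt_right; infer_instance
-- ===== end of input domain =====

-- B replaces A's in-place rightmost-pointer grid scan by a per-row split on '#' with a
-- count-and-rebuild of each segment (objective: simpler, same asymptotic cost).

-- ===== PORT A =====

-- helper: xs[i] = v for an index known to be in range; the guard only totalizes
-- (inside Pre_ every index A writes is in range, so this is exact)
def pvSetIdx {α : Type} (l : List α) (i : Int) (v : α) : List α :=
  if 0 ≤ i ∧ i < (l.length : Int) then l.set i.toNat v else l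


-- one iteration of A's inner 'for col in range(len(tilted[0]) - 1, -1, -1)' loop;
-- state = (tilted[row], rightmost); lines[row][col] is Str.pyGet? (none = IndexError,
-- unreachable inside Pre_)
def pvTiltStep (lineRow : String) (st : List String × Int) (col : Int) : List String × Int :=
  match PySem.Str.pyGet? lineRow col with
  | none => st
  | some c =>
    if c = '#' then (st.1, col - 1)
    else if c = 'O' then (pvSetIdx (pvSetIdx st.1 col ".") st.2 "O", st.2 - 1)
    else st

-- one iteration of A's outer 'for row in range(len(tilted))' loop (it mutates tilted[row])
def pvOuterStep (rows : List String) (til : List (List String)) (row : Int) : List (List String) :=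
  let w : Int := ((til.headD []).length : Int)
  match PySem.List.pyGet? til row, PySem.List.pyGet? rows row with
  | some trow, some lrow =>
      pvSetIdx til row
        (((PySem.List.pyRange (w - 1) (-1) (-1)).foldl (pvTiltStep lrow) (trow, w - 1)).1)
  | _, _ => til

def tilt_right (lines : String) : List (List String) :=
  let rows := (PySem.Str.split? lines "\n").getD []   -- sep "\n" is non-empty: split? is always some
  let tilted := rows.map (fun s => s.toList.map (fun c => String.ofList [c]))
  (PySem.List.pyRange 0 (tilted.length : Int) 1).foldl (pvOuterStep rows) tilted

-- ===== PORT B =====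

def tilt_right_alt (lines : String) : List (List String) :=
  ((PySem.Str.split? lines "\n").getD []).map (fun row =>
    let segs := (PySem.Str.split? row "#").getD []    -- sep "#" is non-empty: split? is always some
    let newSegs := segs.map (fun seg =>
      let k := PySem.Str.count seg "O"
      -- seg[:len(seg)-k] is List.take: len(seg)-k ≥ 0 because count ≤ length
      ((seg.toList.take (seg.toList.length - k)).map (fun c => if c = 'O' then '.' else c))
        ++ List.replicate k 'O')
    (PySem.Chars.join ['#'] newSegs).map (fun c => String.ofList [c]))

-- ===== PRECONDITION & SPEC =====

-- Pre_ restricts to rectangular input (every line as long as the first): on a shorter line A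
-- raises IndexError, and on input with longer lines the grid is malformed — A tilts only the
-- first line's width of each line while B tilts whole lines; both are defensible there.
def Pre_tilt_right (lines : String) : Prop :=
  ∀ r ∈ (PySem.Str.split? lines "\n").getD [],
    PySem.Str.len r = PySem.Str.len (((PySem.Str.split? lines "\n").getD []).headD "")
instance (lines : String) : Decidable (Pre_tilt_right lines) := by
  unfold Pre_tilt_right; infer_instance

def pvWitness_tilt_right : String := "O.#\n..O"

def Spec_tilt_right (lines : String) (out : List (List String)) : Prop := out = tilt_right_alt lines
instance (lines : String) (out : List (List String)) : Decidable (Spec_tilt_right lines out) := by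
  unfold Spec_tilt_right; infer_instance

-- ===== CLAIM (what is proved, stated in full; the proofs are below) =====
def Claim_equal_tilt_right : Prop :=
  ∀ (lines : String), Dom_tilt_right lines → Pre_tilt_right lines →
    Spec_tilt_right lines (tilt_right lines)

-- ===== LEMMAS AND PROOFS =====

-- proof-side vocabulary: the per-segment rebuild and the per-row model
def pvMapO (c : Char) : Char := if c = 'O' then '.' else c
def pvSegTilt (u : List Char) : List Char :=
  (u.take (u.length - u.count 'O')).map pvMapO ++ List.replicate (u.count 'O') 'O'
def pvSings (cs : List Char) : List String := cs.map (fun c => String.ofList [c])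

def pvRowModel (cs : List Char) : List Char :=
  [('#' : Char)].intercalate ((cs.splitOn '#').map pvSegTilt)

@[simp] lemma pvSings_append (a b : List Char) : pvSings (a ++ b) = pvSings a ++ pvSings b := by
  simp [pvSings]
@[simp] lemma pvSings_length (a : List Char) : (pvSings a).length = a.length := by
  simp [pvSings]
@[simp] lemma pvSings_nil : pvSings [] = [] := rfl
@[simp] lemma pvSings_cons (c : Char) (t : List Char) :
    pvSings (c :: t) = String.ofList [c] :: pvSings t := rfl


@[simp] lemma pvSegTilt_nil : pvSegTilt [] = [] := rfl

lemma pvIntercalate_cons₂ (c : Char) (x z : List Char) (zs : List (List Char)) :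
    [c].intercalate (x :: z :: zs) = x ++ c :: [c].intercalate (z :: zs) := by
  simp [List.intercalate, List.intersperse_cons₂]

lemma pvCountGo (c : Char) :
    ∀ (l : List Char) (fuel acc : Nat), l.length ≤ fuel →
      PySem.Chars.count.go [c] fuel l acc = acc + l.count c := by
  intro l
  induction l with
  | nil =>
    intro fuel acc _
    rw [PySem.Chars.count.go.eq_def]
    cases fuel <;> simp
  | cons x t ih =>
    intro fuel acc hf
    cases fuel with
    | zero => simp at hf
    | succ f =>
      have hf' : t.length ≤ f := by simp at hf; omega
      have hpre : [c].isPrefixOf (x :: t) = (c == x) := by simp [List.isPrefixOf]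
      rw [PySem.Chars.count.go.eq_def]
      simp only [hpre]
      by_cases hx : c = x
      · subst hx
        simp only [beq_self_eq_true, if_true, List.length_cons, List.drop_succ_cons,
          List.length_nil, List.drop_zero]
        rw [ih f (acc + 1) hf', List.count_cons]
        simp; omega
      · have hb : (c == x) = false := by simp [hx]
        simp only [hb, Bool.false_eq_true, if_false]
        rw [ih f acc hf', List.count_cons]
        simp [Ne.symm hx]

lemma pvCountSingle (cs : List Char) (c : Char) :
    PySem.Chars.count cs [c] = cs.count c := by
  simp [PySem.Chars.count, pvCountGo c cs cs.length 0 le_rfl]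

lemma pvSplitGo (c : Char) :
    ∀ (fuel : Nat) (l cur : List Char) (acc : List (List Char)), l.length < fuel →
      PySem.Chars.splitOn.go [c] fuel l cur acc
        = acc.reverse ++ (l.splitOn c).modifyHead (cur.reverse ++ ·) := by
  intro fuel
  induction fuel with
  | zero => intro l cur acc h; omega
  | succ f ih =>
    intro l cur acc h
    cases l with
    | nil =>
      rw [PySem.Chars.splitOn.go.eq_def]
      simp [List.splitOn]
    | cons x t =>
      have hpre : [c].isPrefixOf (x :: t) = (c == x) := by simp [List.isPrefixOf]
      rw [PySem.Chars.splitOn.go.eq_def]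
      simp only [hpre]
      by_cases hx : c = x
      · subst hx
        simp only [beq_self_eq_true, if_true, List.length_cons, List.drop_succ_cons,
          List.length_nil, List.drop_zero]
        rw [ih t [] (cur.reverse :: acc) (by simp at h; omega)]
        simp [List.splitOn, List.splitOnP_cons]
        cases List.splitOnP (fun x => x == c) t <;> simp
      · have hb : (c == x) = false := by simp [hx]
        simp only [hb, Bool.false_eq_true, if_false]
        rw [ih t (x :: cur) acc (by simp at h; omega)]
        have hbx : (x == c) = false := by simp [Ne.symm hx]
        simp [List.splitOn, List.splitOnP_cons, hbx, List.modifyHead_modifyHead,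
          Function.comp_def]

lemma pvSplitSingle (cs : List Char) (c : Char) :
    PySem.Chars.splitOn cs [c] = cs.splitOn c := by
  rw [PySem.Chars.splitOn, pvSplitGo c (cs.length + 1) cs [] [] (by omega)]
  cases hsp : cs.splitOn c <;> simp

lemma pvSplitOn_no_mem {c : Char} {a : List Char} (h : c ∉ a) : a.splitOn c = [a] := by
  induction a with
  | nil => simp [List.splitOn]
  | cons x t ih =>
    simp only [List.mem_cons, not_or] at h
    have hbx : (x == c) = false := by simp [Ne.symm h.1]
    simp [List.splitOn, List.splitOnP_cons, hbx] at *
    rw [ih h.2]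
    simp

lemma pvSplitOn_append_cons (c : Char) (a b : List Char) :
    (a ++ c :: b).splitOn c = a.splitOn c ++ b.splitOn c := by
  induction a with
  | nil => simp [List.splitOn, List.splitOnP_cons]
  | cons x t ih =>
    by_cases hx : x = c
    · subst hx
      simp only [List.cons_append, List.splitOn, List.splitOnP_cons, beq_self_eq_true,
        if_true] at *
      rw [ih]
    · have hbx : (x == c) = false := by simp [hx]
      simp only [List.cons_append, List.splitOn, List.splitOnP_cons, hbx,
        Bool.false_eq_true, if_false] at *
      rw [ih]
      obtain ⟨y, ys, hE⟩ := List.exists_cons_of_ne_nil (List.splitOnP_ne_nil (fun x => x == c) t)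
      rw [hE]
      simp

lemma pvIntercalate_append_singleton (c : Char) (l : List (List Char)) (y : List Char)
    (h : l ≠ []) : [c].intercalate (l ++ [y]) = [c].intercalate l ++ c :: y := by
  induction l with
  | nil => exact absurd rfl h
  | cons x t ih =>
    cases t with
    | nil => simp [List.intercalate]
    | cons z zs =>
      have hih := ih (by simp)
      simp only [List.cons_append] at hih ⊢
      rw [pvIntercalate_cons₂, hih, pvIntercalate_cons₂]
      simp

lemma pvModel_nohash {u : List Char} (h : '#' ∉ u) : pvRowModel u = pvSegTilt u := by
  unfold pvRowModel
  rw [pvSplitOn_no_mem h]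
  simp [List.intercalate]

lemma pvModel_hash (a : List Char) {u : List Char} (h : '#' ∉ u) :
    pvRowModel (a ++ '#' :: u) = pvRowModel a ++ '#' :: pvSegTilt u := by
  unfold pvRowModel
  rw [pvSplitOn_append_cons, pvSplitOn_no_mem h]
  rw [List.map_append]
  simp only [List.map_cons, List.map_nil]
  rw [pvIntercalate_append_singleton]
  intro hc
  have := List.splitOnP_ne_nil (fun x => x == '#') a
  simp [List.splitOn] at hc
  exact this (by simpa using hc)

lemma pvLength_segTilt (u : List Char) : (pvSegTilt u).length = u.length := by
  have := List.count_le_length (a := 'O') (l := u)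
  simp [pvSegTilt]
  omega

lemma pvLength_rowModel (cs : List Char) : (pvRowModel cs).length = cs.length := by
  unfold pvRowModel
  conv_rhs => rw [← List.intercalate_splitOn cs '#']
  generalize cs.splitOn '#' = l
  induction l with
  | nil => simp
  | cons x t ih =>
    cases t with
    | nil => simp [List.intercalate, pvLength_segTilt]
    | cons z zs =>
      simp only [List.map_cons] at *
      rw [pvIntercalate_cons₂, pvIntercalate_cons₂]
      simp only [List.length_append, List.length_cons]
      rw [pvLength_segTilt]
      omega

lemma pvSetIdx_append {α : Type} (A B : List α) (i : Int) (j : Nat) (v : α)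
    (hij : i = A.length + j) (hj : j < B.length) :
    pvSetIdx (A ++ B) i v = A ++ B.set j v := by
  unfold pvSetIdx
  have hcond : 0 ≤ i ∧ i < ((A ++ B).length : Int) := by
    simp only [List.length_append]; push_cast; omega
  rw [if_pos hcond]
  have h2 : i.toNat = A.length + j := by omega
  rw [h2, List.set_append]
  simp
lemma pvTiltStep_eval (str : String) (til : List String) (rm col : Int) (c : Char)
    (h : PySem.Str.pyGet? str col = some c) :
    pvTiltStep str (til, rm) col
      = if c = '#' then (til, col - 1)
        else if c = 'O' then (pvSetIdx (pvSetIdx til col ".") rm "O", rm - 1)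
        else (til, rm) := by
  unfold pvTiltStep
  rw [h]

lemma pvMainInv (str : String) (s : List Char) (hs : str.toList = s) :
    ∀ (p : Nat), p ≤ s.length → ∀ (op : List Char) (fx : List String), '#' ∉ op →
      ((PySem.List.pyRange ((p : Int) - 1) (-1) (-1)).foldl (pvTiltStep str)
          (pvSings (s.take p) ++ pvSings (pvSegTilt op) ++ fx,
           (p : Int) - 1 + ((op.length - op.count 'O' : Nat) : Int))).1
        = pvSings (pvRowModel (s.take p ++ op)) ++ fx := by
  intro p
  induction p with
  | zero =>
    intro _ op fx hop
    rw [PySem.List.pyRange_neg_one_eq_nil (by omega)]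
    simp [pvModel_nohash hop]
  | succ q ih =>
    intro hp op fx hop
    have hq : q < s.length := by omega
    have hcast : (((q + 1 : Nat)) : Int) - 1 = (q : Int) := by push_cast; ring
    rw [hcast, PySem.List.pyRange_neg_one_cons (by omega), List.foldl_cons]
    have hget : PySem.Str.pyGet? str (q : Int) = some s[q] := by
      simp [hs, List.getElem?_eq_getElem hq]
    have htake : s.take (q + 1) = s.take q ++ [s[q]] := by
      rw [List.take_add_one, List.getElem?_eq_getElem hq]
      rfl
    have hlenA : (pvSings (s.take q)).length = q := by
      rw [pvSings_length, List.length_take]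
      omega
    have hk : op.count 'O' ≤ op.length := List.count_le_length
    rw [pvTiltStep_eval str _ _ _ _ hget]
    by_cases h1 : s[q] = '#'
    · -- '#' resets rightmost to col - 1 and opens a fresh segment
      rw [if_pos h1]
      have hres := ih (by omega) [] (String.ofList ['#'] :: (pvSings (pvSegTilt op) ++ fx))
        (by simp)
      simp only [pvSegTilt_nil, List.count_nil, List.length_nil, Nat.sub_self, pvSings_nil,
        List.append_nil, List.nil_append, Nat.cast_zero, add_zero] at hres
      rw [htake, h1] at *
      simp only [pvSings_append, pvSings_cons, pvSings_nil, List.append_assoc,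
        List.cons_append, List.nil_append, List.singleton_append] at hres ⊢
      rw [pvModel_hash _ hop]
      simp only [pvSings_append, pvSings_cons, List.append_assoc, List.cons_append,
        List.nil_append]
      exact hres
    · rw [if_neg h1]
      by_cases h2 : s[q] = 'O'
      · rw [if_pos h2]
        rw [htake, h2]
        -- first assignment: tilted[row][col] = "."
        simp only [pvSings_append, pvSings_cons, pvSings_nil, List.append_assoc,
          List.cons_append, List.nil_append]
        rw [show pvSetIdx
              (pvSings (s.take q) ++ String.ofList ['O'] :: (pvSings (pvSegTilt op) ++ fx))
              (q : Int) "."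
            = pvSings (s.take q) ++ "." :: (pvSings (pvSegTilt op) ++ fx) from by
          simpa using pvSetIdx_append (pvSings (s.take q))
            (String.ofList ['O'] :: (pvSings (pvSegTilt op) ++ fx)) (q : Int) 0 "."
            (by rw [hlenA]; simp) (by simp)]
        rcases Nat.eq_zero_or_pos (op.length - op.count 'O') with hm0 | hm1
        · -- the open segment is all rocks: the 'O' lands at the current column
          have hres := ih (by omega) ('O' :: op) fx (by simp [hop])
          have hseg0 : pvSegTilt op = List.replicate (op.count 'O') 'O' := by
            simp [pvSegTilt, hm0]
          have hseg1 : pvSegTilt ('O' :: op) = 'O' :: List.replicate (op.count 'O') 'O' := by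
            have h0 : ('O' :: op).length - ('O' :: op).count 'O' = 0 := by
              simp only [List.length_cons, List.count_cons_self]
              omega
            rw [pvSegTilt, h0]
            simp [List.count_cons, List.replicate_succ]
          rw [show pvSetIdx (pvSings (s.take q) ++ "." :: (pvSings (pvSegTilt op) ++ fx))
                ((q : Int) + ((op.length - op.count 'O' : Nat) : Int)) "O"
              = pvSings (s.take q) ++ "O" :: (pvSings (pvSegTilt op) ++ fx) from by
            simpa using pvSetIdx_append (pvSings (s.take q))
              ("." :: (pvSings (pvSegTilt op) ++ fx))
              ((q : Int) + ((op.length - op.count 'O' : Nat) : Int)) 0 "O"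
              (by rw [hlenA]; omega) (by simp)]
          rw [show (q : Int) + ((op.length - op.count 'O' : Nat) : Int) - 1
              = (q : Int) - 1 + ((('O' :: op).length - ('O' :: op).count 'O' : Nat) : Int) from by
            simp only [List.length_cons, List.count_cons_self]
            omega]
          rw [hseg1] at hres
          rw [hseg0]
          simp only [pvSings_cons, List.append_assoc, List.cons_append, List.nil_append] at hres ⊢
          exact hres
        · -- the 'O' lands on the last free slot of the open segment
          set m := op.length - op.count 'O' with hmdef
          have hm1' : m - 1 < op.length := by omega
          have htkm : op.take m = op.take (m - 1) ++ [op[m - 1]] := by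
            conv_lhs => rw [show m = (m - 1) + 1 by omega]
            rw [List.take_add_one, List.getElem?_eq_getElem hm1']
            rfl
          have hsegop : pvSegTilt op
              = (op.take (m - 1)).map pvMapO
                ++ (pvMapO op[m - 1] :: List.replicate (op.count 'O') 'O') := by
            rw [pvSegTilt, ← hmdef, htkm, List.map_append]
            simp
          have hseg1 : pvSegTilt ('O' :: op)
              = '.' :: ((op.take (m - 1)).map pvMapO
                ++ ('O' :: List.replicate (op.count 'O') 'O')) := by
            have hmm : ('O' :: op).length - ('O' :: op).count 'O' = m := by
              simp only [List.length_cons, List.count_cons_self]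
              omega
            rw [pvSegTilt, hmm, show m = (m - 1) + 1 by omega, List.take_succ_cons,
              List.map_cons, List.count_cons_self, List.replicate_succ]
            have : pvMapO 'O' = '.' := rfl
            rw [this]
            simp
          have hres := ih (by omega) ('O' :: op) fx (by simp [hop])
          rw [hseg1] at hres
          rw [hsegop]
          -- second assignment: tilted[row][rightmost] = "O", at the last free slot
          have hsetEq : pvSetIdx (pvSings (s.take q)
                ++ "." :: (pvSings ((op.take (m - 1)).map pvMapO
                    ++ (pvMapO op[m - 1] :: List.replicate (op.count 'O') 'O')) ++ fx))
                ((q : Int) + ((op.length - op.count 'O' : Nat) : Int)) "O"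
              = pvSings (s.take q)
                ++ "." :: (pvSings ((op.take (m - 1)).map pvMapO)
                  ++ ("O" :: (pvSings (List.replicate (op.count 'O') 'O') ++ fx))) := by
            have hxx := pvSetIdx_append
              (pvSings (s.take q) ++ "." :: pvSings ((op.take (m - 1)).map pvMapO))
              (String.ofList [pvMapO op[m - 1]]
                :: (pvSings (List.replicate (op.count 'O') 'O') ++ fx))
              ((q : Int) + ((op.length - op.count 'O' : Nat) : Int)) 0 "O"
              (by
                simp only [List.length_append, List.length_cons, pvSings_length,
                  List.length_map, List.length_take, hlenA]
                push_cast
                omega)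
              (by simp)
            simp only [pvSings_append, pvSings_cons, pvSings_nil, List.append_assoc,
              List.cons_append, List.nil_append, List.set_cons_zero] at hxx ⊢
            exact hxx
          rw [hsetEq]
          rw [show (q : Int) + (m : Int) - 1
              = (q : Int) - 1 + ((('O' :: op).length - ('O' :: op).count 'O' : Nat) : Int) from by
            simp only [List.length_cons, List.count_cons_self]
            omega]
          simp only [pvSings_append, pvSings_cons, pvSings_nil, List.append_assoc,
            List.cons_append, List.nil_append] at hres ⊢
          exact hres
      · -- any other character: nothing moves, it joins the open segment unchanged
        rw [if_neg h2]
        have hres := ih (by omega) (s[q] :: op) fx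
          (by simp only [List.mem_cons, not_or]; exact ⟨fun hh => h1 hh.symm, hop⟩)
        have h2b : (s[q] == 'O') = false := by simp [h2]
        have hseg : pvSegTilt (s[q] :: op) = s[q] :: pvSegTilt op := by
          have hmm : (s[q] :: op).length - (s[q] :: op).count 'O' = (op.length - op.count 'O') + 1 := by
            simp only [List.length_cons, List.count_cons, h2b, Bool.false_eq_true, if_false]
            omega
          rw [pvSegTilt, hmm, List.take_succ_cons, List.map_cons]
          have hmapc : pvMapO s[q] = s[q] := by simp [pvMapO, h2]
          rw [hmapc, pvSegTilt]
          simp only [List.count_cons, h2b, Bool.false_eq_true, if_false, List.cons_append, add_zero]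
        rw [hseg] at hres
        rw [htake]
        rw [show ((q : Int) + ((op.length - op.count 'O' : Nat) : Int))
            = (q : Int) - 1 + (((s[q] :: op).length - (s[q] :: op).count 'O' : Nat) : Int) from by
          simp only [List.length_cons, List.count_cons, h2b, Bool.false_eq_true, if_false, add_zero]
          omega]
        simp only [pvSings_append, pvSings_cons, pvSings_nil, List.append_assoc,
          List.cons_append, List.nil_append] at hres ⊢
        exact hres

lemma pvInnerEq (str : String) (s : List Char) (hs : str.toList = s) :
    ((PySem.List.pyRange ((s.length : Int) - 1) (-1) (-1)).foldl (pvTiltStep str)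
        (pvSings s, (s.length : Int) - 1)).1 = pvSings (pvRowModel s) := by
  have h := pvMainInv str s hs s.length le_rfl [] [] (by simp)
  simpa using h

lemma pvOuterInv (rows : List String) (w0 : Nat) (hw : ∀ r ∈ rows, r.toList.length = w0) :
    ∀ (d j : Nat), j + d = rows.length →
      (PySem.List.pyRange (j : Int) (rows.length : Int) 1).foldl (pvOuterStep rows)
          ((rows.take j).map (fun r => pvSings (pvRowModel r.toList))
            ++ (rows.drop j).map (fun r => pvSings r.toList))
        = rows.map (fun r => pvSings (pvRowModel r.toList)) := by
  intro d
  induction d with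
  | zero =>
    intro j hj
    rw [PySem.List.pyRange_one_eq_nil (by omega)]
    have hjj : j = rows.length := by omega
    subst hjj
    simp
  | succ dd ih =>
    intro j hj
    have hjlt : j < rows.length := by omega
    rw [PySem.List.pyRange_one_cons (by omega), List.foldl_cons]
    have hlenA : ((rows.take j).map (fun r => pvSings (pvRowModel r.toList))).length = j := by
      simp [List.length_take]
      omega
    have hdropj : rows.drop j = rows[j] :: rows.drop (j + 1) := List.drop_eq_getElem_cons hjlt
    have hhead : (((rows.take j).map (fun r => pvSings (pvRowModel r.toList))
          ++ (rows.drop j).map (fun r => pvSings r.toList)).headD []).length = w0 := by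
      cases rows with
      | nil => simp at hjlt
      | cons r0 rest =>
        cases j with
        | zero => simp [hw r0 List.mem_cons_self]
        | succ jj =>
          rw [List.take_succ_cons, List.map_cons, List.cons_append, List.headD_cons,
            pvSings_length, pvLength_rowModel, hw r0 List.mem_cons_self]
    have hget1 : PySem.List.pyGet? ((rows.take j).map (fun r => pvSings (pvRowModel r.toList))
          ++ (rows.drop j).map (fun r => pvSings r.toList)) (j : Int)
        = some (pvSings rows[j].toList) := by
      rw [PySem.List.pyGet?_natCast, List.getElem?_append_right (by omega), hlenA]
      simp only [Nat.sub_self, hdropj, List.map_cons, List.getElem?_cons_zero]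
    have hget2 : PySem.List.pyGet? rows (j : Int) = some rows[j] := by
      simp [List.getElem?_eq_getElem hjlt]
    rw [show pvOuterStep rows ((rows.take j).map (fun r => pvSings (pvRowModel r.toList))
          ++ (rows.drop j).map (fun r => pvSings r.toList)) (j : Int)
        = (rows.take (j + 1)).map (fun r => pvSings (pvRowModel r.toList))
          ++ (rows.drop (j + 1)).map (fun r => pvSings r.toList) from by
      have hwj := hw rows[j] (List.getElem_mem hjlt)
      simp only [pvOuterStep, hget1, hget2, hhead]
      rw [← hwj]
      rw [pvInnerEq rows[j] rows[j].toList rfl]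
      rw [pvSetIdx_append ((rows.take j).map (fun r => pvSings (pvRowModel r.toList)))
        ((rows.drop j).map (fun r => pvSings r.toList)) (j : Int) 0
        (pvSings (pvRowModel rows[j].toList)) (by rw [hlenA]; simp)
        (by simp only [hdropj, List.map_cons, List.length_cons]; omega)]
      rw [hdropj, List.map_cons, List.set_cons_zero, List.take_add_one,
        List.getElem?_eq_getElem hjlt]
      simp only [Option.toList_some, List.map_append, List.map_cons, List.map_nil,
        List.map_take, List.map_drop]
      simp [List.append_assoc]]
    exact ih (j + 1) (by omega)

lemma pvAEq (lines : String) (hPre : Pre_tilt_right lines) :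
    tilt_right lines
      = ((PySem.Str.split? lines "\n").getD []).map (fun r => pvSings (pvRowModel r.toList)) := by
  show (PySem.List.pyRange 0
        (((((PySem.Str.split? lines "\n").getD []).map
          (fun r => pvSings r.toList)).length : Nat) : Int) 1).foldl
      (pvOuterStep ((PySem.Str.split? lines "\n").getD []))
      (((PySem.Str.split? lines "\n").getD []).map (fun r => pvSings r.toList))
    = ((PySem.Str.split? lines "\n").getD []).map (fun r => pvSings (pvRowModel r.toList))
  have hw : ∀ r ∈ (PySem.Str.split? lines "\n").getD [], r.toList.length
      = ((((PySem.Str.split? lines "\n").getD []).headD "").toList.length) := by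
    intro r hr
    have := hPre r hr
    simp only [PySem.Str.len] at this
    exact_mod_cast this
  have h := pvOuterInv ((PySem.Str.split? lines "\n").getD []) _ hw
    ((PySem.Str.split? lines "\n").getD []).length 0 (by omega)
  simp only [List.take_zero, List.drop_zero, List.map_nil, List.nil_append] at h
  rw [show ((((PySem.Str.split? lines "\n").getD []).map
        (fun (r : String) => pvSings r.toList)).length : Int)
      = ((((PySem.Str.split? lines "\n").getD []).length : Nat) : Int) from by simp]
  rw [show ((0 : Int)) = ((0 : Nat) : Int) from rfl]
  exact h

lemma pvBEq (lines : String) :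
    tilt_right_alt lines
      = ((PySem.Str.split? lines "\n").getD []).map (fun r => pvSings (pvRowModel r.toList)) := by
  unfold tilt_right_alt
  apply List.map_congr_left
  intro row _
  show (PySem.Chars.join ['#']
      ((((PySem.Str.split? row "#").getD []).map (fun seg =>
        ((seg.toList.take (seg.toList.length - PySem.Str.count seg "O")).map
          (fun c => if c = 'O' then '.' else c))
          ++ List.replicate (PySem.Str.count seg "O") 'O')))).map (fun c => String.ofList [c])
    = pvSings (pvRowModel row.toList)
  have hsegs : (PySem.Str.split? row "#").getD []
      = (row.toList.splitOn '#').map String.ofList := by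
    simp [PySem.Str.split?, PySem.Chars.split?, pvSplitSingle]
  rw [hsegs, List.map_map]
  have hmap : ((fun seg => ((seg.toList.take (seg.toList.length - PySem.Str.count seg "O")).map
          (fun c => if c = 'O' then '.' else c))
        ++ List.replicate (PySem.Str.count seg "O") 'O') ∘ String.ofList)
      = pvSegTilt := by
    funext u
    simp only [Function.comp_apply, PySem.Str.count, pvSegTilt, pvMapO,
      String.toList_ofList]
    rw [show ("O" : String).toList = ['O'] from rfl, pvCountSingle]
    rfl
  rw [hmap]
  rw [show PySem.Chars.join ['#'] ((row.toList.splitOn '#').map pvSegTilt)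
      = pvRowModel row.toList from rfl]
  rfl


-- ===== VERDICT (by name: the statement is the Claim_ definition above) =====
theorem tilt_right_spec : Claim_equal_tilt_right := by
  intro lines _ hPre
  unfold Spec_tilt_right
  rw [pvAEq lines hPre, pvBEq lines]
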